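-- pv_equiv track=rewrite | github.com/punkduckable/PDE-READ | Code/Multi_Index_Test.py | Recursive_Counter
-- ===== SOURCE A (Python) =====
-- def Recursive_Counter(
--         sub_index_max   : int,
--         order           : int,
--         sub_index       : int = 0,
--         sub_index_value : int = 0,
--         counter     : int = 0) -> int:
--     """ This function determines the number of "distinct" multi-indicies of
--     specified order whose sub-indicies take values in 0, 1... index_max - 1.
--     Here, two multi-indicies are "the same" if and only if the indicies in one
--     of them can be rearranged into the other. This defines an equivalence
--     relation of multi-indicies. Thus, we are essentially finding the number of
--     equivalence classes.
--
--     For example, if sub_index_max = 4 and order = 2, then the set of possible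
--     multi-indicies is { (0, 0), (0, 1), (0, 2), (0, 3), (1, 1), (1, 2), (1, 3),
--     (2, 2), (2, 3), (3, 3) }, which contains 10 elements. Thus, in this case,
--     this function would return 10.
--
--     ----------------------------------------------------------------------------
--     Arguments:
--
--     sub_index_max : The number of possible variables that can go into each slot.
--     For example, if you want to construct polynomial terms of order 3 from the
--     variables x, y, and z, then index_max = 3.
--
--     order : the order of the multi-indicies (the number of indicies in each
--     multi-index).
--
--     sub_index : keeps track of which sub-index of the multi-index we're working
--     on.
--
--     sub_index_value : this specifies which value we want to put in a particular
--     sub-index of a muti-index.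
--
--     counter : the variable that actually stores the total number of
--     multi-indicies of spcieifed oder whose sub-indicies take values in 0, 1...
--     sub_index_max - 1. This is what's eventually returned.
--
--     ----------------------------------------------------------------------------
--     Returns:
--
--     The total number of "distinct" multi-indicies (as defined above) of
--     specified order such that each sub-index takes values in 0, 1...
--     sub_index_max - 1. """
--
--
--     if (sub_index == order - 1):
--         return counter + (sub_index_max - sub_index_value);
--
--     else : # if (sub_index < order - 1):
--         for j in range(sub_index_value, sub_index_max):
--             counter = Recursive_Counter(
--                         sub_index_max   = sub_index_max,
--                         order           = order,
--                         sub_index       = sub_index + 1,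
--                         sub_index_value = j,
--                         counter         = counter);
--
--         return counter;
-- ===== SOURCE B (Python) =====
-- def Recursive_Counter(
--         sub_index_max   : int,
--         order           : int,
--         sub_index       : int = 0,
--         sub_index_value : int = 0,
--         counter     : int = 0) -> int:
--     # Closed form: the remaining k = order - sub_index slots hold a nondecreasing
--     # sequence drawn from the m = sub_index_max - sub_index_value allowed values,
--     # so the count is C(m + k - 1, k), computed by an O(k) running product.
--     k = order - sub_index
--     m = sub_index_max - sub_index_value
--     if k == 1:
--         return counter + m
--     if m <= 0:
--         return counter
--     c = 1
--     for i in range(1, k + 1):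
--         c = c * (m - 1 + i) // i
--     return counter + c
-- ===== Notes on version B (the rewrite author's own statement) =====
-- stated objective: alternative
-- what changed: Replaces A's recursive enumeration of every nondecreasing index sequence with the stars-and-bars closed form C(m + k - 1, k) evaluated by a single running product over k = order - sub_index factors (intended as asymptotically faster; a timing run saw A time out at n=256 where B returned but could not confirm a ratio).
import Mathlib
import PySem

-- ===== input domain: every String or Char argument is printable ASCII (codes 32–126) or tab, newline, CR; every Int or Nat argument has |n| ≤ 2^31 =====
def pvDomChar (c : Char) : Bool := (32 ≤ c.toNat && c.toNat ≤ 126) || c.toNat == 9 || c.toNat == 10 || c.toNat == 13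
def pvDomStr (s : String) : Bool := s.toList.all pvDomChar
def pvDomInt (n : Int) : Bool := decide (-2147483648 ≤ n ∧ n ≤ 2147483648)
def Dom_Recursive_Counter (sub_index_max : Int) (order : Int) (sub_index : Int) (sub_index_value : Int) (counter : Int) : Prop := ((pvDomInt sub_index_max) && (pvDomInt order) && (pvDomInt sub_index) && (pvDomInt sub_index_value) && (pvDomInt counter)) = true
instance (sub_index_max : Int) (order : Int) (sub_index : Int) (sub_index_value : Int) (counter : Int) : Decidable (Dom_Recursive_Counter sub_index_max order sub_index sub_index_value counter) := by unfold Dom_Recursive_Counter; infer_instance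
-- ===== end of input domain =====

-- B replaces A's recursive enumeration of the multi-indices by the stars-and-bars
-- closed form C(m + k - 1, k), computed with a single running product over k factors.

-- ===== PORT A =====
-- A's recursion terminates exactly when sub_index < order - 1 (depth order-1-sub_index)
-- or the top loop is empty; the fuel (order - 1 - sub_index).toNat is exactly that depth,
-- so on every input where the Python returns, the port runs A's code step for step.
def Recursive_Counter_fuel (fuel : Nat) (sub_index_max : Int) (order : Int) (sub_index : Int) (sub_index_value : Int) (counter : Int) : Int :=
  if sub_index = order - 1 then
    counter + (sub_index_max - sub_index_value)
  else
    match fuel with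
    | 0 => counter  -- reachable only when the loop below is empty (Python diverges otherwise)
    | fuel' + 1 =>
      (PySem.List.pyRange sub_index_value sub_index_max 1).foldl
        (fun acc j => Recursive_Counter_fuel fuel' sub_index_max order (sub_index + 1) j acc)
        counter

def Recursive_Counter (sub_index_max : Int) (order : Int) (sub_index : Int) (sub_index_value : Int) (counter : Int) : Int :=
  Recursive_Counter_fuel (order - 1 - sub_index).toNat sub_index_max order sub_index sub_index_value counter

-- ===== PORT B =====
def Recursive_Counter_alt (sub_index_max : Int) (order : Int) (sub_index : Int) (sub_index_value : Int) (counter : Int) : Int :=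
  let k := order - sub_index
  let m := sub_index_max - sub_index_value
  if k = 1 then
    counter + m
  else if m ≤ 0 then
    counter
  else
    counter + (PySem.List.pyRange 1 (k + 1) 1).foldl
      (fun c i => PySem.Int.floordiv (c * (m - 1 + i)) i) 1

-- ===== PRECONDITION & SPEC =====
-- Pre_ excludes exactly the inputs on which Python A never returns (infinite recursion,
-- ending in RecursionError): sub_index already past order - 1 while the loop is nonempty.
def Pre_Recursive_Counter (sub_index_max : Int) (order : Int) (sub_index : Int) (sub_index_value : Int) (counter : Int) : Prop :=
  ¬ (order - 1 < sub_index ∧ sub_index_value < sub_index_max)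
instance (sub_index_max : Int) (order : Int) (sub_index : Int) (sub_index_value : Int) (counter : Int) : Decidable (Pre_Recursive_Counter sub_index_max order sub_index sub_index_value counter) := by unfold Pre_Recursive_Counter; infer_instance

def pvWitness_Recursive_Counter : Int × Int × Int × Int × Int := (4, 2, 0, 0, 0)

def Spec_Recursive_Counter (sub_index_max : Int) (order : Int) (sub_index : Int) (sub_index_value : Int) (counter : Int) (out : Int) : Prop := out = Recursive_Counter_alt sub_index_max order sub_index sub_index_value counter
instance (sub_index_max : Int) (order : Int) (sub_index : Int) (sub_index_value : Int) (counter : Int) (out : Int) : Decidable (Spec_Recursive_Counter sub_index_max order sub_index sub_index_value counter out) := by unfold Spec_Recursive_Counter; infer_instance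

-- ===== CLAIM (what is proved, stated in full; the proofs are below) =====
def Claim_equal_Recursive_Counter : Prop := ∀ (sub_index_max : Int) (order : Int) (sub_index : Int) (sub_index_value : Int) (counter : Int), Dom_Recursive_Counter sub_index_max order sub_index sub_index_value counter → Pre_Recursive_Counter sub_index_max order sub_index sub_index_value counter → Spec_Recursive_Counter sub_index_max order sub_index sub_index_value counter (Recursive_Counter sub_index_max order sub_index sub_index_value counter)

-- ===== LEMMAS AND PROOFS =====

-- F kn m = number A adds with kn+1 slots left and m allowed values, as a sum recurrence.
def pvFsum (f : Int → Int) : Nat → Int → Int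
  | 0, _ => 0
  | n + 1, m => f m + pvFsum f n (m - 1)

def pvF : Nat → Int → Int
  | 0, m => m
  | kn + 1, m => pvFsum (pvF kn) m.toNat m

theorem pvAchar (kn : Nat) : ∀ (M order v c : Int),
    Recursive_Counter_fuel kn M order (order - 1 - kn) v c = c + pvF kn (M - v) := by
  induction kn with
  | zero =>
    intro M order v c
    simp [Recursive_Counter_fuel, pvF]
  | succ kn ih =>
    intro M order v c
    have hne : (order - 1 - (kn + 1 : Nat) : Int) ≠ order - 1 := by
      push_cast; omega
    rw [Recursive_Counter_fuel, if_neg hne]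
    have hstep : (order - 1 - (kn + 1 : Nat) : Int) + 1 = order - 1 - kn := by
      push_cast; omega
    have ih' : ∀ (j acc : Int),
        Recursive_Counter_fuel kn M order ((order - 1 - ((kn + 1 : Nat) : Int)) + 1) j acc
        = acc + pvF kn (M - j) := by
      intro j acc; rw [hstep]; exact ih M order j acc
    -- inner loop invariant, by induction on the length of the remaining range
    have loop : ∀ (n : Nat) (v c : Int), (M - v).toNat = n →
        (PySem.List.pyRange v M 1).foldl
          (fun acc j => Recursive_Counter_fuel kn M order ((order - 1 - (kn + 1 : Nat) : Int) + 1) j acc) c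
        = c + pvFsum (pvF kn) n (M - v) := by
      intro n
      induction n with
      | zero =>
        intro v c h
        rw [PySem.List.pyRange_one_eq_nil (by omega)]
        simp [pvFsum]
      | succ n ihn =>
        intro v c h
        rw [PySem.List.pyRange_one_cons (by omega)]
        simp only [List.foldl_cons]
        rw [ih' v c]
        rw [ihn (v + 1) _ (by omega)]
        simp only [pvFsum]
        have : M - (v + 1) = M - v - 1 := by ring
        rw [this]; ring
    rw [loop (M - v).toNat v c rfl]
    simp [pvF]

-- closed form for pvF: the stars-and-bars binomial
theorem pvFsum_choose (kn : Nat)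
    (hF : ∀ m : Int, 0 ≤ m ∨ 1 ≤ kn → pvF kn m = (Nat.choose (m.toNat + kn) (kn + 1) : Int)) :
    ∀ (n : Nat) (m : Int), m.toNat = n →
      pvFsum (pvF kn) n m = (Nat.choose (n + kn + 1) (kn + 2) : Int) := by
  intro n
  induction n with
  | zero =>
    intro m h
    simp [pvFsum]
  | succ n ihn =>
    intro m h
    simp only [pvFsum]
    rw [hF m (by omega), ihn (m - 1) (by omega), h]
    have e1 : n + 1 + kn = n + kn + 1 := by omega
    rw [e1]
    have h2 : Nat.choose (n + kn + 1 + 1) (kn + 1 + 1)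
        = Nat.choose (n + kn + 1) (kn + 1) + Nat.choose (n + kn + 1) (kn + 1 + 1) :=
      Nat.choose_succ_succ _ _
    have h3 : (kn + 1 + 1) = kn + 2 := by omega
    rw [h3] at h2
    rw [h2]; push_cast; ring

theorem pvF_choose (kn : Nat) : ∀ m : Int, 0 ≤ m ∨ 1 ≤ kn →
    pvF kn m = (Nat.choose (m.toNat + kn) (kn + 1) : Int) := by
  induction kn with
  | zero =>
    intro m hm
    have h0 : 0 ≤ m := by omega
    show m = ((m.toNat + 0).choose (0 + 1) : Int)
    rw [Nat.add_zero, Nat.choose_one_right]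
    exact (Int.toNat_of_nonneg h0).symm
  | succ kn ih =>
    intro m _
    show pvFsum (pvF kn) m.toNat m = _
    rw [pvFsum_choose kn ih m.toNat m rfl]
    congr 1

-- B's running product computes the binomial exactly
theorem pvProd_choose (m : Int) (hm : 1 ≤ m) : ∀ (k : Nat),
    (PySem.List.pyRange 1 ((k : Int) + 1) 1).foldl
      (fun c i => PySem.Int.floordiv (c * (m - 1 + i)) i) 1
    = (Nat.choose (m.toNat - 1 + k) k : Int) := by
  intro k
  induction k with
  | zero =>
    rw [PySem.List.pyRange_one_eq_nil (by omega)]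
    simp
  | succ k ihk =>
    have hsplit : PySem.List.pyRange 1 ((k : Int) + 1 + 1) 1
        = PySem.List.pyRange 1 ((k : Int) + 1) 1 ++ [(k : Int) + 1] := by
      have := PySem.List.pyRange_one_succ_right (a := 1) (b := (k : Int) + 1) (by omega)
      simpa using this
    push_cast
    rw [hsplit, List.foldl_append]
    push_cast at ihk
    rw [ihk]
    simp only [List.foldl_cons, List.foldl_nil]
    have hmt : m.toNat = m := by omega
    have harg : (Nat.choose (m.toNat - 1 + k) k : Int) * (m - 1 + ((k : Int) + 1))
        = (Nat.choose (m.toNat + k) (k + 1) : Int) * ((k : Int) + 1) := by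
      have hid := Nat.add_one_mul_choose_eq (m.toNat - 1 + k) k
      -- (m.toNat - 1 + k).succ = m.toNat + k  since 1 ≤ m.toNat
      have h1 : m.toNat - 1 + k + 1 = m.toNat + k := by omega
      rw [h1] at hid
      have : ((m.toNat + k) * Nat.choose (m.toNat - 1 + k) k : Int)
           = (Nat.choose (m.toNat + k) (k + 1) * (k + 1) : Nat) := by
        exact_mod_cast congrArg (Nat.cast : Nat → Int) hid
      push_cast at this
      have hmk : (m - 1 + ((k : Int) + 1)) = ((m.toNat : Int) + k) := by omega
      rw [hmk]
      linarith [this]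
    rw [harg, PySem.Int.floordiv_eq_ediv_of_pos (by omega : (0:Int) < (k:Int) + 1)]
    rw [Int.mul_ediv_cancel _ (by omega : ((k : Int) + 1) ≠ 0)]
    congr 2
    omega

-- ===== VERDICT (by name: the statement is the Claim_ definition above) =====
theorem Recursive_Counter_spec : Claim_equal_Recursive_Counter := by
  intro M order s v c _ hpre
  unfold Pre_Recursive_Counter at hpre
  unfold Spec_Recursive_Counter Recursive_Counter Recursive_Counter_alt
  simp only []
  by_cases hk1 : order - s = 1
  · -- k = 1: A takes the base branch, B the first branch
    have hs : s = order - 1 := by omega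
    have hf : (order - 1 - s).toNat = 0 := by omega
    rw [hf, Recursive_Counter_fuel, if_pos hs, if_pos hk1]
  · rw [if_neg hk1]
    by_cases hlt : s < order - 1
    · -- k ≥ 2: both compute the stars-and-bars count
      set kn : Nat := (order - 1 - s).toNat - 1 with hkn
      have hfuel : (order - 1 - s).toNat = kn + 1 := by omega
      have hsval : s = order - 1 - ((kn + 1 : Nat) : Int) := by push_cast; omega
      have hA : Recursive_Counter_fuel (kn + 1) M order s v c
          = c + pvF (kn + 1) (M - v) := by
        rw [hsval]; exact pvAchar (kn + 1) M order v c
      rw [hfuel, hA, pvF_choose (kn + 1) (M - v) (Or.inr (by omega))]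
      by_cases hm : M - v ≤ 0
      · rw [if_pos hm]
        have ht0 : (M - v).toNat = 0 := by omega
        have h0 : Nat.choose (0 + (kn + 1)) (kn + 1 + 1) = 0 :=
          Nat.choose_eq_zero_of_lt (by omega)
        rw [ht0, h0]
        simp
      · rw [if_neg hm]
        have hk : order - s = ((kn + 2 : Nat) : Int) := by push_cast; omega
        have hB : (PySem.List.pyRange 1 (order - s + 1) 1).foldl
            (fun c i => PySem.Int.floordiv (c * (M - v - 1 + i)) i) 1
            = (Nat.choose ((M - v).toNat - 1 + (kn + 2)) (kn + 2) : Int) := by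
          rw [hk]
          exact_mod_cast pvProd_choose (M - v) (by omega) (kn + 2)
        rw [hB]
        have harg : (M - v).toNat - 1 + (kn + 2) = (M - v).toNat + (kn + 1) := by omega
        rw [harg]
    · -- s > order - 1: Pre_ forces the loop empty; both return counter
      have hgt : order - 1 < s := by omega
      have hvm : M ≤ v := by
        by_contra hvm
        exact hpre ⟨hgt, by omega⟩
      have hne : s ≠ order - 1 := by omega
      have hm0 : M - v ≤ 0 := by omega
      have hf : (order - 1 - s).toNat = 0 := by omega
      rw [hf, Recursive_Counter_fuel, if_neg hne, if_pos hm0]
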